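-- pv_equiv track=rewrite | github.com/ch7ze/rag-code-search-finetuning-study | rag_chat.py | shorten_path
-- ===== SOURCE A (Python) =====
-- def shorten_path(path: str) -> str:
--     """
--     Shorten path to start from 'codebase' folder.
--     Example: c:\\Users\\...\\codebase\\src\\auth.rs -> codebase/src/auth.rs
--     """
--     if 'codebase' in path.lower():
--         # Find the position of 'codebase' (case-insensitive)
--         parts = path.replace('\\', '/').split('/')
--         try:
--             # Find 'codebase' in the parts
--             for i, part in enumerate(parts):
--                 if part.lower() == 'codebase':
--                     # Return everything from 'codebase' onwards
--                     return '/'.join(parts[i:])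
--         except (ValueError, IndexError):
--             pass
--     return path
-- ===== SOURCE B (Python) =====
-- def shorten_path(path: str) -> str:
--     """
--     Shorten path to start from 'codebase' folder.
--     Walks the normalized string by peeling one '/'-component at a time with
--     str.partition and returns the suffix itself -- no list of parts, no join.
--     """
--     rest = path.replace('\\', '/')
--     while True:
--         head, sep, tail = rest.partition('/')
--         if head.lower() == 'codebase':
--             return rest
--         if not sep:
--             return path
--         rest = tail
-- ===== Notes on version B (the rewrite author's own statement) =====
-- stated objective: idiomatic
-- what changed: B drops A's substring guard, split-into-parts list, enumerate scan and the join call: it walks the normalized string itself, peeling one component at a time with str.partition and returning the matching suffix directly.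
import Mathlib
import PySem

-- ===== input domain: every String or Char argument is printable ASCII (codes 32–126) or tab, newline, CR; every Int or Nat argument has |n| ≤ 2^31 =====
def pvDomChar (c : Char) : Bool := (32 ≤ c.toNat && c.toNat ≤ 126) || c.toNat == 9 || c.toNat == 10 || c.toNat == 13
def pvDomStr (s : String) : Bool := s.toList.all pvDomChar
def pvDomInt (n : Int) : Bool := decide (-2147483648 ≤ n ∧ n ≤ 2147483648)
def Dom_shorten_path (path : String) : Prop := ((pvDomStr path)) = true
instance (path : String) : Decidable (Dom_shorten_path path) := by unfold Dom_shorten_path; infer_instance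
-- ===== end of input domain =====

-- B replaces A's split-into-parts + enumerate + '/'.join with a single walk over the
-- normalized string that peels one component at a time via str.partition and returns
-- the matching suffix directly (objective: idiomatic/alternative, no list building).

-- ===== PORT A =====
-- A's for-loop over enumerate(parts): at the first part whose .lower() == 'codebase'
-- return '/'.join(parts[i:]) (= join of the current suffix); falling off the loop
-- reaches the final 'return path'.  (A's try/except is dead code: nothing inside raises.)
def shortenA_go (path : String) : List (List Char) → String
  | [] => path
  | p :: rest =>
    if PySem.Chars.lower p = "codebase".toList then
      String.ofList (PySem.Chars.join ['/'] (p :: rest))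
    else shortenA_go path rest

def shorten_path (path : String) : String :=
  if PySem.Str.isIn "codebase" (PySem.Str.lower path) then
    shortenA_go path
      (PySem.Chars.splitOn (PySem.Chars.replace path.toList ['\\'] ['/']) ['/'])
  else path

-- ===== PORT B =====
-- Source B's while-loop over suffixes of the normalized string; str.partition('/') is
-- ported by hand (exact): head = chars before the first '/', 'not sep' ↔ no '/' found
-- (head is all of rest), tail = chars after that first '/'.
def shortenB_go (path : String) (rest : List Char) : String :=
  if PySem.Chars.lower (rest.takeWhile (· ≠ '/')) = "codebase".toList then
    String.ofList rest
  else if h : (rest.takeWhile (· ≠ '/')).length = rest.length then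
    path
  else
    shortenB_go path (rest.drop ((rest.takeWhile (· ≠ '/')).length + 1))
termination_by rest.length
decreasing_by
  have hle := (List.takeWhile_sublist (l := rest) (p := (· ≠ '/'))).length_le
  simp only [List.length_drop]
  omega

def shorten_path_alt (path : String) : String :=
  shortenB_go path (PySem.Chars.replace path.toList ['\\'] ['/'])

-- ===== PRECONDITION & SPEC =====
def Spec_shorten_path (path : String) (out : String) : Prop := out = shorten_path_alt path
instance (path : String) (out : String) : Decidable (Spec_shorten_path path out) := by unfold Spec_shorten_path; infer_instance

-- ===== CLAIM (what is proved, stated in full; the proofs are below) =====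
def Claim_equal_shorten_path : Prop := ∀ (path : String), Dom_shorten_path path → Spec_shorten_path path (shorten_path path)

-- ===== LEMMAS AND PROOFS =====

-- The character map performed by path.replace('\\', '/').
def pvNorm (c : Char) : Char := if c = '\\' then '/' else c

theorem pv_replace_go_norm (fuel : Nat) (l acc : List Char) (h : l.length ≤ fuel) :
    PySem.Chars.replace.go ['\\'] ['/'] fuel l acc = acc.reverse ++ l.map pvNorm := by
  induction fuel generalizing l acc with
  | zero =>
    have : l = [] := List.eq_nil_of_length_eq_zero (Nat.le_zero.mp h)
    subst this
    simp [PySem.Chars.replace.go]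
  | succ n ih =>
    cases l with
    | nil => simp [PySem.Chars.replace.go]
    | cons c t =>
      rw [PySem.Chars.replace.go]
      by_cases hc : c = '\\'
      · subst hc
        simp only [List.isPrefixOf, BEq.rfl, Bool.true_and, if_true]
        rw [ih _ _ (by simpa using Nat.le_of_succ_le_succ h)]
        simp [pvNorm]
      · have : (['\\'].isPrefixOf (c :: t)) = false := by
          simp [List.isPrefixOf, (by simpa [eq_comm] using hc : ¬ ('\\' = c))]
        rw [this]
        simp only [Bool.false_eq_true, if_false]
        rw [ih _ _ (by simpa using Nat.le_of_succ_le_succ h)]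
        simp [pvNorm, hc]

theorem pv_replace_norm (l : List Char) :
    PySem.Chars.replace l ['\\'] ['/'] = l.map pvNorm := by
  rw [PySem.Chars.replace]
  simp only [List.isEmpty_cons, Bool.false_eq_true, if_false]
  rw [pv_replace_go_norm _ _ _ (Nat.le_refl _)]
  simp

-- Pure structural recursion computing the '/'-chunks of a char list (proof-side model of split('/')).
def pvChunks : List Char → List (List Char)
  | [] => [[]]
  | c :: rest =>
    if c = '/' then [] :: pvChunks rest
    else
      match pvChunks rest with
      | p :: ps => (c :: p) :: ps
      | [] => [[c]]

theorem pvChunks_ne_nil (l : List Char) : pvChunks l ≠ [] := by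
  induction l with
  | nil => simp [pvChunks]
  | cons c rest ih =>
    rw [pvChunks]
    split
    · simp
    · cases hr : pvChunks rest with
      | nil => exact absurd hr ih
      | cons p ps => simp

theorem pv_splitOn_go_chunks (fuel : Nat) (l cur : List Char) (acc : List (List Char)) (h : l.length ≤ fuel) :
    PySem.Chars.splitOn.go ['/'] fuel l cur acc =
      acc.reverse ++ (match pvChunks l with
        | p :: ps => (cur.reverse ++ p) :: ps
        | [] => []) := by
  induction fuel generalizing l cur acc with
  | zero =>
    have : l = [] := List.eq_nil_of_length_eq_zero (Nat.le_zero.mp h)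
    subst this
    simp [PySem.Chars.splitOn.go, pvChunks]
  | succ n ih =>
    cases l with
    | nil => simp [PySem.Chars.splitOn.go, pvChunks]
    | cons c t =>
      rw [PySem.Chars.splitOn.go]
      by_cases hc : c = '/'
      · subst hc
        simp only [List.isPrefixOf, BEq.rfl, Bool.true_and, if_true,
          List.length_cons, List.drop_succ_cons]
        rw [ih _ _ _ (by simpa using Nat.le_of_succ_le_succ h)]
        obtain ⟨p, ps, hps⟩ := List.exists_cons_of_ne_nil (pvChunks_ne_nil t)
        rw [pvChunks]
        simp [hps]
      · have hpre : (['/'].isPrefixOf (c :: t)) = false := by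
          simp [List.isPrefixOf, (by simpa [eq_comm] using hc : ¬ ('/' = c))]
        rw [hpre]
        simp only [Bool.false_eq_true, if_false]
        rw [ih _ _ _ (by simpa using Nat.le_of_succ_le_succ h)]
        obtain ⟨p, ps, hps⟩ := List.exists_cons_of_ne_nil (pvChunks_ne_nil t)
        rw [pvChunks]
        simp [hps, hc]

theorem pv_splitOn_eq_chunks (l : List Char) :
    PySem.Chars.splitOn l ['/'] = pvChunks l := by
  rw [PySem.Chars.splitOn]
  rw [pv_splitOn_go_chunks _ _ _ _ (Nat.le_succ_of_le (Nat.le_refl _))]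
  obtain ⟨p, ps, hps⟩ := List.exists_cons_of_ne_nil (pvChunks_ne_nil l)
  simp [hps]

theorem pv_join_cons (sep : List Char) (c : Char) (p : List Char) (ps : List (List Char)) :
    PySem.Chars.join sep ((c :: p) :: ps) = c :: PySem.Chars.join sep (p :: ps) := by
  cases ps with
  | nil => rw [PySem.Chars.join_singleton, PySem.Chars.join_singleton]
  | cons q qs =>
    rw [PySem.Chars.join_cons_cons, PySem.Chars.join_cons_cons]
    simp

theorem pv_join_chunks (l : List Char) :
    PySem.Chars.join ['/'] (pvChunks l) = l := by
  induction l with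
  | nil => simp [pvChunks, PySem.Chars.join_singleton]
  | cons c rest ih =>
    rw [pvChunks]
    by_cases hc : c = '/'
    · subst hc
      simp only [if_true]
      obtain ⟨p, ps, hps⟩ := List.exists_cons_of_ne_nil (pvChunks_ne_nil rest)
      rw [hps] at ih ⊢
      rw [PySem.Chars.join_cons_cons, ih]
      simp
    · simp only [hc, if_false]
      obtain ⟨p, ps, hps⟩ := List.exists_cons_of_ne_nil (pvChunks_ne_nil rest)
      rw [hps] at ih ⊢
      rw [pv_join_cons, ih]

theorem pvChunks_no_slash (l : List Char) (h : '/' ∉ l) : pvChunks l = [l] := by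
  induction l with
  | nil => rfl
  | cons c rest ih =>
    have hc : ¬ (c = '/') := fun hc => h (hc ▸ List.mem_cons_self)
    rw [pvChunks]
    simp only [hc, if_false]
    rw [ih (fun hm => h (List.mem_cons_of_mem _ hm))]

theorem pvChunks_slash (l : List Char) (h : '/' ∈ l) :
    pvChunks l = l.takeWhile (· ≠ '/') ::
      pvChunks (l.drop ((l.takeWhile (· ≠ '/')).length + 1)) := by
  induction l with
  | nil => exact absurd h (List.not_mem_nil)
  | cons c rest ih =>
    by_cases hc : c = '/'
    · subst hc
      rw [pvChunks]
      simp
    · have hr : '/' ∈ rest := by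
        cases List.mem_cons.mp h with
        | inl h0 => exact absurd h0.symm hc
        | inr h0 => exact h0
      have htw : (c :: rest).takeWhile (fun x => decide (x ≠ '/')) =
          c :: rest.takeWhile (fun x => decide (x ≠ '/')) := by
        simp [hc]
      rw [pvChunks, if_neg hc, ih hr, htw]
      simp

theorem pv_takeWhile_lt (l : List Char) (h : '/' ∈ l) :
    (l.takeWhile (· ≠ '/')).length < l.length := by
  by_contra hn
  have hlen : (l.takeWhile (· ≠ '/')).length = l.length :=
    Nat.le_antisymm (List.takeWhile_sublist _).length_le (Nat.le_of_not_lt hn)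
  have heq : l.takeWhile (· ≠ '/') = l :=
    (List.takeWhile_sublist _).eq_of_length hlen
  have hall := List.takeWhile_eq_self_iff.mp heq
  simpa using hall '/' h

-- Core: A's loop over the parts of l computes what B's suffix walk computes.
theorem pv_go_eq (path : String) (l : List Char) :
    shortenA_go path (pvChunks l) = shortenB_go path l := by
  fun_induction shortenB_go path l with
  | case1 rest hcond =>
    by_cases hs : '/' ∈ rest
    · rw [pvChunks_slash rest hs, shortenA_go]
      rw [if_pos hcond, ← pvChunks_slash rest hs, pv_join_chunks]
    · have htw : rest.takeWhile (· ≠ '/') = rest := by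
        rw [List.takeWhile_eq_self_iff]
        intro a ha
        simp only [decide_eq_true_eq]
        exact fun hav => hs (hav ▸ ha)
      rw [pvChunks_no_slash rest hs, shortenA_go]
      rw [htw] at hcond
      rw [if_pos hcond, PySem.Chars.join_singleton]
  | case2 rest hcond hlen =>
    have htw : rest.takeWhile (· ≠ '/') = rest :=
      (List.takeWhile_sublist _).eq_of_length hlen
    have hs : '/' ∉ rest := by
      intro hs
      exact Nat.lt_irrefl _ (hlen ▸ pv_takeWhile_lt rest hs)
    rw [pvChunks_no_slash rest hs, shortenA_go]
    rw [htw] at hcond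
    rw [if_neg hcond]
    rfl
  | case3 rest hcond hlen ih =>
    have hs : '/' ∈ rest := by
      by_contra hs
      have htw : rest.takeWhile (· ≠ '/') = rest := by
        rw [List.takeWhile_eq_self_iff]
        intro a ha
        simp only [decide_eq_true_eq]
        exact fun hav => hs (hav ▸ ha)
      exact hlen (by rw [htw])
    rw [pvChunks_slash rest hs, shortenA_go, if_neg hcond]
    exact ih

-- If 'codebase' is not a substring of the lowered list, B's walk falls through to path.
theorem pv_noMatch (path : String) (l : List Char)
    (h : ¬ ("codebase".toList <:+: PySem.Chars.lower l)) :
    shortenB_go path l = path := by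
  fun_induction shortenB_go path l with
  | case1 rest hcond =>
    exfalso
    apply h
    have hpre : (rest.takeWhile (· ≠ '/')).map PySem.Chars.lowerChar <+:
        rest.map PySem.Chars.lowerChar :=
      (List.takeWhile_prefix _).map _
    rw [(by simp [PySem.Chars.lower] : PySem.Chars.lower (rest.takeWhile (· ≠ '/')) =
      (rest.takeWhile (· ≠ '/')).map PySem.Chars.lowerChar)] at hcond
    rw [PySem.Chars.lower]
    exact hcond ▸ hpre.isInfix
  | case2 rest hcond hlen => rfl
  | case3 rest hcond hlen ih =>
    apply ih
    intro hinf
    apply h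
    have hsuf : (rest.drop ((rest.takeWhile (· ≠ '/')).length + 1)).map PySem.Chars.lowerChar <:+
        rest.map PySem.Chars.lowerChar :=
      (List.drop_suffix _ _).map _
    rw [PySem.Chars.lower] at hinf ⊢
    exact hinf.trans hsuf.isInfix

-- Lowered letters other than '/' are unaffected by the backslash normalization.
theorem pv_unlower (m w : List Char) (hw : ∀ d ∈ w, d ≠ '/')
    (h : m.map (fun c => PySem.Chars.lowerChar (pvNorm c)) = w) :
    m.map PySem.Chars.lowerChar = w := by
  induction m generalizing w with
  | nil => exact h
  | cons c t ih =>
    cases w with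
    | nil => exact absurd h (by simp)
    | cons d ws =>
      simp only [List.map_cons, List.cons.injEq] at h ⊢
      obtain ⟨hd, hts⟩ := h
      refine ⟨?_, ih ws (fun x hx => hw x (List.mem_cons_of_mem _ hx)) hts⟩
      by_cases hc : c = '\\'
      · exfalso
        apply hw d List.mem_cons_self
        rw [← hd, hc]
        simp [pvNorm]
        decide
      · rw [← hd]
        simp [pvNorm, hc]

-- A substring occurrence in the lowered normalized string yields one in the lowered original.
theorem pv_infix_transfer (l : List Char)
    (h : "codebase".toList <:+: PySem.Chars.lower (l.map pvNorm)) :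
    "codebase".toList <:+: PySem.Chars.lower l := by
  rw [(by simp [PySem.Chars.lower, List.map_map] : PySem.Chars.lower (l.map pvNorm) =
    l.map (fun c => PySem.Chars.lowerChar (pvNorm c)))] at h
  obtain ⟨s, t, hst⟩ := h
  rw [List.append_assoc] at hst
  obtain ⟨l₁, l₂, hl, hs, hwt⟩ := List.map_eq_append_iff.mp hst.symm
  obtain ⟨m, l₃, hl₂, hw, ht⟩ := List.map_eq_append_iff.mp hwt
  have hm : m.map PySem.Chars.lowerChar = "codebase".toList :=
    pv_unlower m _ (by simp) hw
  refine ⟨l₁.map PySem.Chars.lowerChar, l₃.map PySem.Chars.lowerChar, ?_⟩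
  rw [PySem.Chars.lower, hl, hl₂]
  simp [hm]

-- ===== VERDICT (by name: the statement is the Claim_ definition above) =====
theorem shorten_path_spec : Claim_equal_shorten_path := by
  intro path _
  unfold Spec_shorten_path shorten_path shorten_path_alt
  rw [pv_replace_norm, pv_splitOn_eq_chunks]
  by_cases hg : PySem.Str.isIn "codebase" (PySem.Str.lower path) = true
  · simp only [hg, if_true]
    exact pv_go_eq path _
  · have hg' : PySem.Str.isIn "codebase" (PySem.Str.lower path) = false := by
      simpa using hg
    simp only [hg', Bool.false_eq_true, if_false]
    rw [eq_comm]
    apply pv_noMatch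
    intro hinf
    have h2 : "codebase".toList <:+: PySem.Chars.lower path.toList :=
      pv_infix_transfer _ hinf
    have h3 : PySem.Str.isIn "codebase" (PySem.Str.lower path) = true :=
      (PySem.Str.isIn_iff_infix _ _).2 (by simpa [PySem.Str.toList_lower] using h2)
    rw [hg'] at h3
    exact Bool.false_ne_true h3
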